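-- pv_equiv track=rewrite | github.com/InternLM/lmdeploy | lmdeploy/pytorch/nn/moe.py | _split_size
-- ===== SOURCE A (Python) =====
-- def _split_size(size: int, world_size: int, align: int):
--     size = size // align
--     assert size >= world_size
--     base = size // world_size
--     remain = size % world_size
--     split_size = [base + 1] * remain + [base] * (world_size - remain)
--     split_size = [s * align for s in split_size]
--     return split_size
-- ===== SOURCE B (Python) =====
-- def _split_size(size: int, world_size: int, align: int):
--     size = size // align
--     assert size >= world_size
--     out = []
--     remaining = size
--     for i in range(world_size):
--         chunks_left = world_size - i
--         chunk = -(-remaining // chunks_left)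
--         out.append(chunk * align)
--         remaining -= chunk
--     return out
-- ===== Notes on version B (the rewrite author's own statement) =====
-- stated objective: alternative
-- what changed: Replaces the base/remainder replicate-and-concatenate construction with a single greedy loop that hands each rank the ceiling of the remaining size over the remaining ranks.
import Mathlib
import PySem

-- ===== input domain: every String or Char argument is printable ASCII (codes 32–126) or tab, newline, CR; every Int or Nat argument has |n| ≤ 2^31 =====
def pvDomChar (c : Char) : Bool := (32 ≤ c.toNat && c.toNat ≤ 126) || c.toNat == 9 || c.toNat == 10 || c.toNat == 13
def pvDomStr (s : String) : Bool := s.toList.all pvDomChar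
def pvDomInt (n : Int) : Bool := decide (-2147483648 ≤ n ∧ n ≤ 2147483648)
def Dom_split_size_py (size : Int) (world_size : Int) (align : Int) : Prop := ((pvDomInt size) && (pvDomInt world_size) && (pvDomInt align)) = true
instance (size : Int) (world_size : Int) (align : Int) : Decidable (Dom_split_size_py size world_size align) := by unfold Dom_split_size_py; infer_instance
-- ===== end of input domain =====

-- B replaces the base/remainder replicate-and-concatenate construction by a greedy loop giving
-- each rank the ceiling of the remaining size over the remaining ranks (objective: alternative).

-- ===== PORT A =====
def split_size_py (size : Int) (world_size : Int) (align : Int) : List Int :=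
  let size' := PySem.Int.floordiv size align
  let base := PySem.Int.floordiv size' world_size
  let remain := PySem.Int.mod size' world_size
  let split_size := List.replicate remain.toNat (base + 1) ++
                    List.replicate (world_size - remain).toNat base
  split_size.map (fun s => s * align)

-- ===== PORT B =====
-- loop over i in range(world_size); the fuel n+1 is chunks_left = world_size - i
def pvAltLoop (align : Int) (remaining : Int) : Nat → List Int
  | 0 => []
  | n + 1 =>
      let chunk := -(PySem.Int.floordiv (-remaining) ((n : Int) + 1))
      chunk * align :: pvAltLoop align (remaining - chunk) n

def split_size_py_alt (size : Int) (world_size : Int) (align : Int) : List Int :=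
  let size' := PySem.Int.floordiv size align
  pvAltLoop align size' world_size.toNat

-- ===== PRECONDITION & SPEC =====
-- Pre_ excludes exactly the inputs on which A raises: align = 0 (ZeroDivisionError),
-- world_size = 0 (ZeroDivisionError) and size // align < world_size (AssertionError).
def Pre_split_size_py (size : Int) (world_size : Int) (align : Int) : Prop :=
  align ≠ 0 ∧ world_size ≠ 0 ∧ world_size ≤ PySem.Int.floordiv size align
instance (size : Int) (world_size : Int) (align : Int) : Decidable (Pre_split_size_py size world_size align) := by unfold Pre_split_size_py; infer_instance

def pvWitness_split_size_py : Int × Int × Int := (10, 3, 1)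

def Spec_split_size_py (size : Int) (world_size : Int) (align : Int) (out : List Int) : Prop := out = split_size_py_alt size world_size align
instance (size : Int) (world_size : Int) (align : Int) (out : List Int) : Decidable (Spec_split_size_py size world_size align out) := by unfold Spec_split_size_py; infer_instance

-- ===== CLAIM (what is proved, stated in full; the proofs are below) =====
def Claim_equal_split_size_py : Prop := ∀ (size : Int) (world_size : Int) (align : Int), Dom_split_size_py size world_size align → Pre_split_size_py size world_size align → Spec_split_size_py size world_size align (split_size_py size world_size align)

-- ===== LEMMAS AND PROOFS =====

-- the ceiling chunk in terms of floor quotient and remainder (positive divisor d)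
lemma pvChunk_eq (s d : Int) (hd : 0 < d) :
    -(PySem.Int.floordiv (-s) d) =
      PySem.Int.floordiv s d + (if PySem.Int.mod s d = 0 then 0 else 1) := by
  have hqr := PySem.Int.floordiv_mul_add_mod s d
  have hr0 := PySem.Int.mod_nonneg s hd
  have hrlt := PySem.Int.mod_lt s hd
  rw [PySem.Int.neg_floordiv_neg_eq_iff_of_pos hd]
  set q := PySem.Int.floordiv s d
  set r := PySem.Int.mod s d
  by_cases h : r = 0
  · simp [h]; constructor <;> nlinarith
  · have h1 : 1 ≤ r := by omega
    simp [h]; constructor <;> nlinarith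

-- the greedy loop with w+1 chunks left produces A's front-loaded list
lemma pvAltLoop_eq (w : Nat) : ∀ s align : Int,
    pvAltLoop align s (w + 1) =
      (List.replicate (PySem.Int.mod s ((w : Int) + 1)).toNat
          (PySem.Int.floordiv s ((w : Int) + 1) + 1) ++
       List.replicate (((w : Int) + 1) - PySem.Int.mod s ((w : Int) + 1)).toNat
          (PySem.Int.floordiv s ((w : Int) + 1))).map (fun x => x * align) := by
  induction w with
  | zero =>
      intro s align
      have h1 : PySem.Int.floordiv s 1 = s := by
        rw [PySem.Int.floordiv_eq_iff_of_pos one_pos]; omega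
      have h2 : PySem.Int.mod s 1 = 0 := by
        have := PySem.Int.floordiv_mul_add_mod s 1
        rw [h1] at this; omega
      have h3 : -(PySem.Int.floordiv (-s) 1) = s := by
        rw [PySem.Int.neg_floordiv_neg_eq_iff_of_pos one_pos]; omega
      simp only [pvAltLoop, Nat.cast_zero, zero_add, h1, h2, h3]
      simp
  | succ w ih =>
      intro s align
      rw [pvAltLoop]
      simp only [Nat.cast_add, Nat.cast_one]
      have hd : (0:Int) < (w:Int) + 1 + 1 := by positivity
      have hqr := PySem.Int.floordiv_mul_add_mod s ((w:Int) + 1 + 1)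
      have hr0 := PySem.Int.mod_nonneg s hd
      have hrlt := PySem.Int.mod_lt s hd
      set q := PySem.Int.floordiv s ((w:Int) + 1 + 1) with hq
      set r := PySem.Int.mod s ((w:Int) + 1 + 1) with hr
      have hchunk := pvChunk_eq s ((w:Int) + 1 + 1) hd
      rw [← hq, ← hr] at hchunk
      have hd' : (0:Int) < (w:Int) + 1 := by positivity
      by_cases h0 : r = 0
      · -- even split: chunk = q, remainder stays 0, quotient stays q
        have hc : -(PySem.Int.floordiv (-s) ((w:Int) + 1 + 1)) = q := by rw [hchunk]; simp [h0]
        rw [hc, ih]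
        have hq' : PySem.Int.floordiv (s - q) ((w:Int) + 1) = q := by
          rw [PySem.Int.floordiv_eq_iff_of_pos hd']; constructor <;> nlinarith
        have hr' : PySem.Int.mod (s - q) ((w:Int) + 1) = 0 := by
          have := PySem.Int.floordiv_mul_add_mod (s - q) ((w:Int) + 1)
          rw [hq'] at this; nlinarith
        rw [hq', hr', h0]
        have h2 : ((w:Int) + 1 + 1 - 0).toNat = ((w:Int) + 1 - 0).toNat + 1 := by omega
        rw [h2, List.replicate_succ]
        simp
      · -- chunk = q + 1; remainder drops by one, quotient stays q
        have hc : -(PySem.Int.floordiv (-s) ((w:Int) + 1 + 1)) = q + 1 := by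
          rw [hchunk]; simp [h0]
        rw [hc, ih]
        have hr1 : 1 ≤ r := by omega
        have hq' : PySem.Int.floordiv (s - (q + 1)) ((w:Int) + 1) = q := by
          rw [PySem.Int.floordiv_eq_iff_of_pos hd']; constructor <;> nlinarith
        have hr' : PySem.Int.mod (s - (q + 1)) ((w:Int) + 1) = r - 1 := by
          have := PySem.Int.floordiv_mul_add_mod (s - (q + 1)) ((w:Int) + 1)
          rw [hq'] at this; nlinarith
        rw [hq', hr']
        have h1 : r.toNat = (r - 1).toNat + 1 := by omega
        have h2 : ((w:Int) + 1 + 1 - r).toNat = ((w:Int) + 1 - (r - 1)).toNat := by omega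
        rw [h1, h2, List.replicate_succ]
        simp

-- ===== VERDICT (by name: the statement is the Claim_ definition above) =====
theorem split_size_py_spec : Claim_equal_split_size_py := by
  intro size world_size align _ hpre
  obtain ⟨_, hw, _⟩ := hpre
  unfold Spec_split_size_py split_size_py split_size_py_alt
  set s := PySem.Int.floordiv size align
  rcases lt_or_gt_of_ne hw with hneg | hpos
  · -- world_size < 0: both sides are []
    have hb := PySem.Int.mod_neg_bounds s hneg
    have h1 : (PySem.Int.mod s world_size).toNat = 0 := by omega
    have h2 : (world_size - PySem.Int.mod s world_size).toNat = 0 := by omega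
    have h3 : world_size.toNat = 0 := by omega
    simp [h1, h2, h3, pvAltLoop]
  · -- world_size > 0: write world_size.toNat as w + 1 and use the loop lemma
    obtain ⟨w, hw'⟩ : ∃ w : Nat, world_size.toNat = w + 1 :=
      ⟨world_size.toNat - 1, by omega⟩
    have hws : world_size = (w : Int) + 1 := by omega
    rw [hw', pvAltLoop_eq, hws]
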